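-- pv_equiv track=rewrite | github.com/ruben210698/Project_TFM_Dummy | visualizacion/grafico14.py | reducir_posiciones_finales_eje_y
-- ===== SOURCE A (Python) =====
-- def loop_reducir_posiciones_finales_eje_y(posiciones_finales, cambiado):
--     ultima_y_leida = 0
--     dim_y_reducir = 0
--     i = -1
--     posiciones_finales_loop = posiciones_finales.copy()
--     cambiado = False
--     for palabra, posicion in posiciones_finales_loop.items():
--         i += 1
--         pos_y_actual = posicion[1]
--         if (pos_y_actual - ultima_y_leida) > 5:
--             dim_y_reducir += (pos_y_actual - ultima_y_leida - 5)
--         if dim_y_reducir > 0: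
--             nueva_pos_y = pos_y_actual - dim_y_reducir
--             posiciones_finales.update({palabra: (posicion[0], nueva_pos_y)})
--             cambiado = True
--         ultima_y_leida = pos_y_actual
--     return posiciones_finales, cambiado
--
-- def reducir_posiciones_finales_eje_y(posiciones_finales):
--     posiciones_finales = posiciones_finales.copy()
--     # TODO lo que hace esta funcion es
--     # 1. ordena de menor a mayor todos los elementos y
--     # 2. mira si entre 1 y otro de alguno hay más de 10 elementos (recurda que están ordenados de menor a mayor)
--     # 3. si existe, cojo las posiciones finales iniciales y reduzco esa diferencia "excesiva" a todas las ys
--     #  de todos los elementos que estén por encima de ese numero :)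
--
--     # tengo que crear un diccionario de {palabra: {pos_x: pos_y}}
--     # y que ordene por pos_y en orden.
--
--     posiciones_finales = dict(sorted(posiciones_finales.items(), key=lambda x: x[1][1]))
--
--     cambiado = False
--     posiciones_finales, cambiado = loop_reducir_posiciones_finales_eje_y(posiciones_finales, cambiado)
--
--     while cambiado == True:
--         posiciones_finales, cambiado = loop_reducir_posiciones_finales_eje_y(posiciones_finales, cambiado)
--
--     return posiciones_finales
-- ===== SOURCE B (Python) =====
-- def reducir_posiciones_finales_eje_y(posiciones_finales):
--     # Single pass over the y-sorted items: clamp every consecutive gap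
--     # (measured from 0 for the first item) to at most 5, tracking the
--     # previous original y and the previous emitted y.
--     comprimidas = []
--     prev_orig = 0
--     prev_new = 0
--     for palabra, (pos_x, pos_y) in sorted(posiciones_finales.items(), key=lambda x: x[1][1]):
--         prev_new = prev_new + min(pos_y - prev_orig, 5)
--         comprimidas.append((palabra, (pos_x, prev_new)))
--         prev_orig = pos_y
--     return dict(comprimidas)
-- ===== Notes on version B (the rewrite author's own statement) =====
-- stated objective: simpler
-- what changed: Replaces A's helper pass that accumulates a running excess and rewrites the dict in place, plus the outer while-cambiado loop that reruns whole passes until stable, with a single pass over the y-sorted items that clamps each consecutive gap (measured from 0) to at most 5 while tracking the previous original and previous emitted y, building a fresh dict.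
import Mathlib
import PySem

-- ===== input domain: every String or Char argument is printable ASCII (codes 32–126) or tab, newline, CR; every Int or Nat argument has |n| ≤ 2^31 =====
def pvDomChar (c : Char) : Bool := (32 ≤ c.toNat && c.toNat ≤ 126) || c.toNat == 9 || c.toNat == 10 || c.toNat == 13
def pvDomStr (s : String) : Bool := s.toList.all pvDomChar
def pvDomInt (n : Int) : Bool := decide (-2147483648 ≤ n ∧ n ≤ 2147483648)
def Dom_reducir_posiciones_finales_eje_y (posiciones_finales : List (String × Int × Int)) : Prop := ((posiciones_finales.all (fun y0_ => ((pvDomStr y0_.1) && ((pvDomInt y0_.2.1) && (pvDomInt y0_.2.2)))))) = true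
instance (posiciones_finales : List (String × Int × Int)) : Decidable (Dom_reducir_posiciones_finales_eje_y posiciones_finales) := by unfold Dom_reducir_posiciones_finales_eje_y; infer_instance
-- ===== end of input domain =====

-- B replaces A's repeated subtract-the-excess passes and while-loop with one pass over the
-- y-sorted items that clamps each consecutive gap to at most 5 (objective: simpler).


-- ===== PORT A =====
-- loop body of loop_reducir_posiciones_finales_eje_y: state (dict, ultima_y_leida, dim_y_reducir, i, cambiado)
def pasoA (st : PySem.Dict String (Int × Int) × Int × Int × Int × Bool)
    (pr : String × Int × Int) : PySem.Dict String (Int × Int) × Int × Int × Int × Bool :=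
  match st, pr with
  | (dd, ultima, dim, i, camb), (palabra, posx, posy) =>
    let i := i + 1
    let dim := if posy - ultima > 5 then dim + (posy - ultima - 5) else dim
    if dim > 0 then (dd.insert palabra (posx, posy - dim), posy, dim, i, true)
    else (dd, posy, dim, i, camb)

def loop_reducir_posiciones_finales_eje_y (posiciones_finales : PySem.Dict String (Int × Int))
    (_cambiado : Bool) : PySem.Dict String (Int × Int) × Bool :=
  -- iterates over a copy of the items while updating the dict; cambiado is reset to False
  let st := posiciones_finales.items.foldl pasoA (posiciones_finales, 0, 0, -1, false)
  (st.1, st.2.2.2.2)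

-- the 'while cambiado' loop; the fuel only makes the recursion total (it is provably never exhausted)
def whileA (fuel : Nat) (d : PySem.Dict String (Int × Int)) (camb : Bool) :
    PySem.Dict String (Int × Int) :=
  match fuel with
  | 0 => d
  | n + 1 =>
    if camb then
      let r := loop_reducir_posiciones_finales_eje_y d camb
      whileA n r.1 r.2
    else d

def reducir_posiciones_finales_eje_y (posiciones_finales : List (String × Int × Int)) :
    List (String × Int × Int) :=
  let d := PySem.Dict.ofList posiciones_finales
  let d := PySem.Dict.ofList (PySem.List.sorted d.items (fun x => x.2.2))
  let r := loop_reducir_posiciones_finales_eje_y d false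
  (whileA (posiciones_finales.length + 1) r.1 r.2).items

-- ===== PORT B =====
-- loop body of B: state (comprimidas, prev_orig, prev_new)
def pasoB (st : List (String × Int × Int) × Int × Int) (pr : String × Int × Int) :
    List (String × Int × Int) × Int × Int :=
  match st, pr with
  | (comprimidas, prev_orig, prev_new), (palabra, pos_x, pos_y) =>
    let prev_new := prev_new + min (pos_y - prev_orig) 5
    (comprimidas ++ [(palabra, pos_x, prev_new)], pos_y, prev_new)

def reducir_posiciones_finales_eje_y_alt (posiciones_finales : List (String × Int × Int)) :
    List (String × Int × Int) :=
  let orden := PySem.List.sorted (PySem.Dict.ofList posiciones_finales).items (fun x => x.2.2)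
  let st := orden.foldl pasoB ([], 0, 0)
  (PySem.Dict.ofList st.1).items

-- ===== PRECONDITION & SPEC =====
def Spec_reducir_posiciones_finales_eje_y (posiciones_finales : List (String × Int × Int)) (out : List (String × Int × Int)) : Prop := out = reducir_posiciones_finales_eje_y_alt posiciones_finales
instance (posiciones_finales : List (String × Int × Int)) (out : List (String × Int × Int)) : Decidable (Spec_reducir_posiciones_finales_eje_y posiciones_finales out) := by unfold Spec_reducir_posiciones_finales_eje_y; infer_instance

-- ===== CLAIM (what is proved, stated in full; the proofs are below) =====
def Claim_equal_reducir_posiciones_finales_eje_y : Prop := ∀ (posiciones_finales : List (String × Int × Int)), Dom_reducir_posiciones_finales_eje_y posiciones_finales → Spec_reducir_posiciones_finales_eje_y posiciones_finales (reducir_posiciones_finales_eje_y posiciones_finales)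

-- ===== LEMMAS AND PROOFS =====

-- pure description of one pass of A's loop: (updated items, cambiado)
def passA (u dim : Int) : List (String × Int × Int) → List (String × Int × Int) × Bool
  | [] => ([], false)
  | (k, x, y) :: rest =>
    let dim' := if y - u > 5 then dim + (y - u - 5) else dim
    let r := passA y dim' rest
    if dim' > 0 then ((k, x, y - dim') :: r.1, true) else ((k, x, y) :: r.1, r.2)

-- pure description of B's pass
def compress (u v : Int) : List (String × Int × Int) → List (String × Int × Int)
  | [] => []
  | (k, x, y) :: rest => (k, x, v + min (y - u) 5) :: compress y (v + min (y - u) 5) rest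

-- "every consecutive y-gap (from u) is at most 5"
def GOk (u : Int) : List (String × Int × Int) → Prop
  | [] => True
  | (_, _, y) :: rest => y ≤ u + 5 ∧ GOk y rest

lemma keys_compress (u v : Int) (l : List (String × Int × Int)) :
    (compress u v l).map Prod.fst = l.map Prod.fst := by
  induction l generalizing u v with
  | nil => rfl
  | cons hd tl ih => obtain ⟨k, x, y⟩ := hd; simp [compress, ih]

lemma passA_eq_compress (l : List (String × Int × Int)) (u dim : Int) (h : 0 ≤ dim) :
    (passA u dim l).1 = compress u (u - dim) l := by
  induction l generalizing u dim with
  | nil => rfl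
  | cons hd tl ih =>
    obtain ⟨k, x, y⟩ := hd
    by_cases hgt : y - u > 5
    · have h' : 0 ≤ dim + (y - u - 5) := by omega
      simp only [passA, compress, if_pos hgt, if_pos (show dim + (y - u - 5) > 0 by omega)]
      rw [ih _ _ h']
      rw [show y - (dim + (y - u - 5)) = u - dim + min (y - u) 5 by omega]
    · by_cases hpos : dim > 0
      · simp only [passA, compress, if_neg hgt, if_pos hpos]
        rw [ih _ _ h]
        rw [show y - dim = u - dim + min (y - u) 5 by omega]
      · simp only [passA, compress, if_neg hgt, if_neg hpos]
        rw [ih _ _ h]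
        rw [show u - dim + min (y - u) 5 = y by omega, show y - dim = y by omega]

lemma gok_passA (l : List (String × Int × Int)) (u dim : Int) (h : 0 ≤ dim) :
    GOk (u - dim) (passA u dim l).1 := by
  induction l generalizing u dim with
  | nil => simp [passA, GOk]
  | cons hd tl ih =>
    obtain ⟨k, x, y⟩ := hd
    by_cases hgt : y - u > 5
    · have h' : 0 ≤ dim + (y - u - 5) := by omega
      simp only [passA, GOk, if_pos hgt, if_pos (show dim + (y - u - 5) > 0 by omega)]
      exact ⟨by omega, ih y _ h'⟩
    · by_cases hpos : dim > 0
      · simp only [passA, GOk, if_neg hgt, if_pos hpos]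
        exact ⟨by omega, ih y dim h⟩
      · have hz : dim = 0 := by omega
        subst hz
        simp only [passA, GOk, if_neg hgt, if_neg hpos]
        refine ⟨by omega, ?_⟩
        simpa using ih y 0 le_rfl

lemma passA_id (l : List (String × Int × Int)) (u : Int) (h : GOk u l) :
    passA u 0 l = (l, false) := by
  induction l generalizing u with
  | nil => rfl
  | cons hd tl ih =>
    obtain ⟨k, x, y⟩ := hd
    obtain ⟨h1, h2⟩ := h
    have hgt : ¬ (y - u > 5) := by omega
    simp only [passA, if_neg hgt, if_neg (show ¬ ((0 : Int) > 0) by omega)]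
    rw [ih y h2]

lemma map_replace_unique (p s : List (String × Int × Int)) (k : String) (w v : Int × Int)
    (h : ((p ++ (k, w) :: s).map Prod.fst).Nodup) :
    (p ++ (k, w) :: s).map (fun pr => if pr.1 == k then (k, v) else pr) = p ++ (k, v) :: s := by
  have hform : (p ++ (k, w) :: s).map Prod.fst = p.map Prod.fst ++ k :: s.map Prod.fst := by simp
  rw [hform] at h
  have hkp : ∀ pr ∈ p, pr.1 ≠ k := by
    intro pr hpr hc
    have h1 : k ∈ p.map Prod.fst := hc ▸ List.mem_map_of_mem hpr
    exact (List.disjoint_of_nodup_append h) h1 (by simp)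
  have hks : ∀ pr ∈ s, pr.1 ≠ k := by
    intro pr hpr hc
    have h2 : (k :: s.map Prod.fst).Nodup := (List.Nodup.of_append_right h)
    exact (List.nodup_cons.mp h2).1 (hc ▸ List.mem_map_of_mem hpr)
  rw [List.map_append, List.map_cons]
  congr 1
  · conv_rhs => rw [← List.map_id p]
    exact List.map_congr_left fun pr hpr => by simp [hkp pr hpr]
  · congr 1
    · simp
    · conv_rhs => rw [← List.map_id s]
      exact List.map_congr_left fun pr hpr => by simp [hks pr hpr]

lemma contains_of_mem_items (d : PySem.Dict String (Int × Int)) (k : String) (v : Int × Int)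
    (h : (k, v) ∈ d.items) : d.contains k = true := by
  simp only [PySem.Dict.contains, List.any_eq_true]
  exact ⟨(k, v), h, by simp⟩

-- invariant of A's loop fold: the processed prefix p is already rewritten, the suffix s is intact
lemma foldA_inv (s : List (String × Int × Int)) : ∀ (p : List (String × Int × Int))
    (dd : PySem.Dict String (Int × Int)) (u dim i : Int) (camb : Bool),
    ((p ++ s).map Prod.fst).Nodup → dd.items = p ++ s →
    (s.foldl pasoA (dd, u, dim, i, camb)).1.items = p ++ (passA u dim s).1 ∧
      (s.foldl pasoA (dd, u, dim, i, camb)).2.2.2.2 = (camb || (passA u dim s).2) := by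
  induction s with
  | nil => intro p dd u dim i camb _ hitems; simpa [passA] using hitems
  | cons hd tl ih =>
    intro p dd u dim i camb hnodup hitems
    obtain ⟨k, x, y⟩ := hd
    by_cases hgt : y - u > 5
    · by_cases hpos : dim + (y - u - 5) > 0
      · have hstep : pasoA (dd, u, dim, i, camb) (k, x, y) =
            (dd.insert k (x, y - (dim + (y - u - 5))), y, dim + (y - u - 5), i + 1, true) := by
          simp only [pasoA, if_pos hgt, if_pos hpos]
        have hmem : (k, (x, y)) ∈ dd.items := by rw [hitems]; simp
        have hcont : dd.contains k = true := contains_of_mem_items dd k (x, y) hmem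
        have hitems2 : (dd.insert k (x, y - (dim + (y - u - 5)))).items =
            (p ++ [(k, x, y - (dim + (y - u - 5)))]) ++ tl := by
          rw [PySem.Dict.items_insert_of_contains dd _ hcont, hitems,
            map_replace_unique p tl k (x, y) (x, y - (dim + (y - u - 5))) hnodup]
          simp
        have hnodup2 : (((p ++ [(k, x, y - (dim + (y - u - 5)))]) ++ tl).map Prod.fst).Nodup := by
          have he : ((p ++ [(k, x, y - (dim + (y - u - 5)))]) ++ tl).map Prod.fst =
              (p ++ (k, x, y) :: tl).map Prod.fst := by simp
          rw [he]; exact hnodup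
        obtain ⟨h1, h2⟩ := ih (p ++ [(k, x, y - (dim + (y - u - 5)))])
          (dd.insert k (x, y - (dim + (y - u - 5)))) y (dim + (y - u - 5)) (i + 1) true
          hnodup2 hitems2
        rw [List.foldl_cons, hstep]
        constructor
        · rw [h1]
          simp only [passA, if_pos hgt, if_pos hpos]
          simp
        · rw [h2]
          simp only [passA, if_pos hgt, if_pos hpos]
          simp
      · have hstep : pasoA (dd, u, dim, i, camb) (k, x, y) =
            (dd, y, dim + (y - u - 5), i + 1, camb) := by
          simp only [pasoA, if_pos hgt, if_neg hpos]
        have hnodup2 : (((p ++ [(k, x, y)]) ++ tl).map Prod.fst).Nodup := by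
          have he : ((p ++ [(k, x, y)]) ++ tl).map Prod.fst =
              (p ++ (k, x, y) :: tl).map Prod.fst := by simp
          rw [he]; exact hnodup
        have hitems2 : dd.items = (p ++ [(k, x, y)]) ++ tl := by rw [hitems]; simp
        obtain ⟨h1, h2⟩ := ih (p ++ [(k, x, y)]) dd y (dim + (y - u - 5)) (i + 1) camb
          hnodup2 hitems2
        rw [List.foldl_cons, hstep]
        constructor
        · rw [h1]
          simp only [passA, if_pos hgt, if_neg hpos]
          simp
        · rw [h2]
          simp only [passA, if_pos hgt, if_neg hpos]
    · by_cases hpos : dim > 0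
      · have hstep : pasoA (dd, u, dim, i, camb) (k, x, y) =
            (dd.insert k (x, y - dim), y, dim, i + 1, true) := by
          simp only [pasoA, if_neg hgt, if_pos hpos]
        have hmem : (k, (x, y)) ∈ dd.items := by rw [hitems]; simp
        have hcont : dd.contains k = true := contains_of_mem_items dd k (x, y) hmem
        have hitems2 : (dd.insert k (x, y - dim)).items = (p ++ [(k, x, y - dim)]) ++ tl := by
          rw [PySem.Dict.items_insert_of_contains dd _ hcont, hitems,
            map_replace_unique p tl k (x, y) (x, y - dim) hnodup]
          simp
        have hnodup2 : (((p ++ [(k, x, y - dim)]) ++ tl).map Prod.fst).Nodup := by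
          have he : ((p ++ [(k, x, y - dim)]) ++ tl).map Prod.fst =
              (p ++ (k, x, y) :: tl).map Prod.fst := by simp
          rw [he]; exact hnodup
        obtain ⟨h1, h2⟩ := ih (p ++ [(k, x, y - dim)]) (dd.insert k (x, y - dim)) y dim (i + 1)
          true hnodup2 hitems2
        rw [List.foldl_cons, hstep]
        constructor
        · rw [h1]
          simp only [passA, if_neg hgt, if_pos hpos]
          simp
        · rw [h2]
          simp only [passA, if_neg hgt, if_pos hpos]
          simp
      · have hstep : pasoA (dd, u, dim, i, camb) (k, x, y) = (dd, y, dim, i + 1, camb) := by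
          simp only [pasoA, if_neg hgt, if_neg hpos]
        have hnodup2 : (((p ++ [(k, x, y)]) ++ tl).map Prod.fst).Nodup := by
          have he : ((p ++ [(k, x, y)]) ++ tl).map Prod.fst =
              (p ++ (k, x, y) :: tl).map Prod.fst := by simp
          rw [he]; exact hnodup
        have hitems2 : dd.items = (p ++ [(k, x, y)]) ++ tl := by rw [hitems]; simp
        obtain ⟨h1, h2⟩ := ih (p ++ [(k, x, y)]) dd y dim (i + 1) camb hnodup2 hitems2
        rw [List.foldl_cons, hstep]
        constructor
        · rw [h1]
          simp only [passA, if_neg hgt, if_neg hpos]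
          simp
        · rw [h2]
          simp only [passA, if_neg hgt, if_neg hpos]

-- B's fold appends compress
lemma foldB_inv (l : List (String × Int × Int)) : ∀ (acc : List (String × Int × Int)) (u v : Int),
    (l.foldl pasoB (acc, u, v)).1 = acc ++ compress u v l := by
  induction l with
  | nil => intro acc u v; simp [compress]
  | cons hd tl ih =>
    intro acc u v
    obtain ⟨k, x, y⟩ := hd
    rw [List.foldl_cons]
    show (tl.foldl pasoB (acc ++ [(k, x, v + min (y - u) 5)], y, v + min (y - u) 5)).1 = _
    rw [ih]
    simp [compress]

lemma items_ofList_nodup (l : List (String × Int × Int)) (h : (l.map Prod.fst).Nodup) :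
    (PySem.Dict.ofList l).items = l := by
  have := PySem.Dict.items_foldl_insert_fresh (d := (PySem.Dict.empty : PySem.Dict String (Int × Int)))
    (l := l) (k := Prod.fst) (v := Prod.snd) (by simp) h
  simpa [PySem.Dict.ofList, PySem.Dict.update, PySem.Dict.items, PySem.Dict.empty] using this

lemma whileA_false (n : Nat) (d : PySem.Dict String (Int × Int)) : whileA n d false = d := by
  cases n <;> simp [whileA]

-- characterisation of one call of A's loop helper on a dict with distinct keys
lemma loop_char (d : PySem.Dict String (Int × Int)) (c : Bool)
    (h : (d.items.map Prod.fst).Nodup) :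
    (loop_reducir_posiciones_finales_eje_y d c).1.items = (passA 0 0 d.items).1 ∧
      (loop_reducir_posiciones_finales_eje_y d c).2 = (passA 0 0 d.items).2 := by
  obtain ⟨h1, h2⟩ := foldA_inv d.items [] d 0 0 (-1) false (by simpa using h) (by simp)
  exact ⟨by simpa using h1, by simpa using h2⟩

-- ===== VERDICT (by name: the statement is the Claim_ definition above) =====
theorem reducir_posiciones_finales_eje_y_spec : Claim_equal_reducir_posiciones_finales_eje_y := by
  intro pf _
  unfold Spec_reducir_posiciones_finales_eje_y
  unfold reducir_posiciones_finales_eje_y reducir_posiciones_finales_eje_y_alt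
  set d0 := PySem.Dict.ofList pf with hd0
  set l0 := PySem.List.sorted d0.items (fun x => x.2.2) with hl0
  have hnd0 : (d0.items.map Prod.fst).Nodup := PySem.Dict.nodup_keys_ofList pf
  have hndl0 : (l0.map Prod.fst).Nodup :=
    (List.Perm.nodup_iff ((PySem.List.sorted_perm d0.items (fun x => x.2.2) false).map Prod.fst)).mpr hnd0
  set d1 := PySem.Dict.ofList l0 with hd1
  have hitems1 : d1.items = l0 := items_ofList_nodup l0 hndl0
  have hnd1 : (d1.items.map Prod.fst).Nodup := by rw [hitems1]; exact hndl0
  -- B's value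
  have hB : (PySem.Dict.ofList (l0.foldl pasoB ([], 0, 0)).1).items = (passA 0 0 l0).1 := by
    have hc : (l0.foldl pasoB ([], 0, 0)).1 = compress 0 0 l0 := by
      simpa using foldB_inv l0 [] 0 0
    rw [hc, items_ofList_nodup _ (by rw [keys_compress]; exact hndl0)]
    rw [passA_eq_compress l0 0 0 le_rfl]
    norm_num
  -- A's first pass
  obtain ⟨ha1, ha2⟩ := loop_char d1 false hnd1
  rw [hitems1] at ha1 ha2
  set r := loop_reducir_posiciones_finales_eje_y d1 false with hr
  -- the while loop leaves the items unchanged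
  have hA : (whileA (pf.length + 1) r.1 r.2).items = (passA 0 0 l0).1 := by
    cases hcb : r.2 with
    | false => rw [whileA_false]; exact ha1
    | true =>
      show (whileA (pf.length + 1) r.1 true).items = (passA 0 0 l0).1
      rw [whileA, if_pos rfl]
      have hndr : (r.1.items.map Prod.fst).Nodup := by
        rw [ha1, passA_eq_compress l0 0 0 le_rfl, keys_compress]
        exact hndl0
      obtain ⟨hb1, hb2⟩ := loop_char r.1 true hndr
      have hid : passA 0 0 r.1.items = (r.1.items, false) := by
        apply passA_id
        rw [ha1]
        simpa using gok_passA l0 0 0 le_rfl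
      rw [hid] at hb1 hb2
      dsimp only at hb1 hb2
      show (whileA pf.length (loop_reducir_posiciones_finales_eje_y r.1 true).1
          (loop_reducir_posiciones_finales_eje_y r.1 true).2).items = (passA 0 0 l0).1
      rw [hb2, whileA_false, hb1, ha1]
  rw [hA, hB]
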